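-- pv_equiv track=rewrite | github.com/Ruby570bocadito/Wormy | evasion/ids_detector.py | _has_unusual_services
-- ===== SOURCE A (Python) =====
-- from typing import Dict, List, Optional, Tuple
--
-- def _has_unusual_services(ports: List[int]) -> bool:
--     """Check for unusual service combinations"""
--     # Honeypots often run many services that wouldn't normally coexist
--
--     # Check for conflicting services
--     has_windows_services = any(p in ports for p in [135, 139, 445, 3389])
--     has_linux_services = any(p in ports for p in [22])
--
--     # Suspicious if both Windows and Linux services
--     if has_windows_services and has_linux_services:
--         return True
--
--     # Check for too many database ports
--     db_ports = [1433, 3306, 5432, 27017, 6379]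
--     db_count = sum(1 for p in db_ports if p in ports)
--     if db_count > 2:
--         return True
--
--     return False
-- ===== SOURCE B (Python) =====
-- def _has_unusual_services(ports):
--     """Check for unusual service combinations (single pass over ports)."""
--     has_windows = False
--     has_linux = False
--     db_seen = set()
--     for p in ports:
--         if p in (135, 139, 445, 3389):
--             has_windows = True
--         if p == 22:
--             has_linux = True
--         if p in (1433, 3306, 5432, 27017, 6379):
--             db_seen.add(p)
--     return (has_windows and has_linux) or len(db_seen) > 2
-- ===== Notes on version B (the rewrite author's own statement) =====
-- stated objective: alternative
-- what changed: B replaces A's repeated membership scans over ports (one scan per candidate service port) with a single traversal of ports maintaining two flags and a set of distinct database ports seen.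
import Mathlib
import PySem

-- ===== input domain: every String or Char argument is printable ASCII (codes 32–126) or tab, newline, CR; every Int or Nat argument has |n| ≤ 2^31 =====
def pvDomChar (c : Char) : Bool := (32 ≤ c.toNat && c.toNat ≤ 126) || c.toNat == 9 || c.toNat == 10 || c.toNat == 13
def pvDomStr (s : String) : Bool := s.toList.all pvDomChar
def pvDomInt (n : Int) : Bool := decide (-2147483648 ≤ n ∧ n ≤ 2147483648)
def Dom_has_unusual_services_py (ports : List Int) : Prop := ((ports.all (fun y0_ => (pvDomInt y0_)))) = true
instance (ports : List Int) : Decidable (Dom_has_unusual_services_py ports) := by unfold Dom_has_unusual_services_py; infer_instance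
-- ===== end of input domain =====

-- B changes the decomposition: one pass over ports with two flags and a distinct-db-port set,
-- instead of A's per-candidate membership scans; same result everywhere (objective: alternative).

-- ===== PORT A =====
-- literal transliteration of A: any(p in ports for p in [...]) twice, then a count over db_ports
def has_unusual_services_py (ports : List Int) : Bool :=
  let has_windows_services := [(135:Int), 139, 445, 3389].any (fun p => ports.contains p)
  let has_linux_services := [(22:Int)].any (fun p => ports.contains p)
  if has_windows_services && has_linux_services then true
  else
    let db_ports := [(1433:Int), 3306, 5432, 27017, 6379]
    -- sum(1 for p in db_ports if p in ports)
    let db_count : Int := ((db_ports.filter (fun p => ports.contains p)).map (fun _ => (1:Int))).sum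
    if db_count > 2 then true else false

-- ===== PORT B =====
-- one fold over ports, state = (has_windows, has_linux, db_seen : PySem.Set Int)
def pvStepB (st : Bool × Bool × PySem.Set Int) (p : Int) : Bool × Bool × PySem.Set Int :=
  let w := if [(135:Int), 139, 445, 3389].contains p then true else st.1
  let l := if p == 22 then true else st.2.1
  let s := if [(1433:Int), 3306, 5432, 27017, 6379].contains p then PySem.Set.add st.2.2 p else st.2.2
  (w, l, s)

def has_unusual_services_py_alt (ports : List Int) : Bool :=
  let st := ports.foldl pvStepB (false, false, PySem.Set.empty)
  (st.1 && st.2.1) || decide (PySem.Set.len st.2.2 > 2)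

-- ===== PRECONDITION & SPEC =====
def Spec_has_unusual_services_py (ports : List Int) (out : Bool) : Prop := out = has_unusual_services_py_alt ports
instance (ports : List Int) (out : Bool) : Decidable (Spec_has_unusual_services_py ports out) := by unfold Spec_has_unusual_services_py; infer_instance

-- ===== CLAIM (what is proved, stated in full; the proofs are below) =====
def Claim_equal_has_unusual_services_py : Prop := ∀ (ports : List Int), Dom_has_unusual_services_py ports → Spec_has_unusual_services_py ports (has_unusual_services_py ports)

-- ===== LEMMAS AND PROOFS =====

theorem pvBeqFalse {a b : Int} (h : a ≠ b) : (a == b) = false := beq_eq_false_iff_ne.mpr h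

-- characterization of B's fold for an arbitrary starting state
theorem pvFold_char (ports : List Int) (w l : Bool) (s : PySem.Set Int) :
    ports.foldl pvStepB (w, l, s) =
      (w || ports.any (fun p => [(135:Int), 139, 445, 3389].contains p),
       l || ports.any (fun p => p == 22),
       PySem.Set.update s (ports.filter (fun p => [(1433:Int), 3306, 5432, 27017, 6379].contains p))) := by
  induction ports generalizing w l s with
  | nil => simp [PySem.Set.update]
  | cons p ps ih =>
    simp only [List.foldl_cons, pvStepB, List.any_cons, List.filter_cons]
    split_ifs <;> rw [ih] <;> clear ih <;>
      simp_all [PySem.Set.update_cons, Bool.or_comm, beq_iff_eq, pvBeqFalse]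

theorem pvLen_eq (ports : List Int) :
    (PySem.Set.ofList (ports.filter (fun p => [(1433:Int), 3306, 5432, 27017, 6379].contains p))).length
      = ([(1433:Int), 3306, 5432, 27017, 6379].filter (fun p => ports.contains p)).length := by
  apply List.Perm.length_eq
  rw [List.perm_ext_iff_of_nodup]
  · intro a
    simp [PySem.Set.mem_ofList, List.mem_filter, and_comm]
  · exact PySem.Set.nodup_ofList _
  · exact List.Nodup.filter _ (by decide)

theorem pvUpdateEmpty (xs : List Int) :
    PySem.Set.update PySem.Set.empty xs = PySem.Set.ofList xs := rfl

theorem pvSumOnes (xs : List Int) : ((xs.map (fun _ => (1:Int))).sum) = (xs.length : Int) := by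
  induction xs with
  | nil => simp
  | cons x xs ih => simp only [List.map_cons, List.sum_cons, List.length_cons, ih]; push_cast; ring

theorem pvAnySwap (xs ys : List Int) :
    (xs.any fun p => ys.contains p) = (ys.any fun p => xs.contains p) := by
  rw [Bool.eq_iff_iff]
  simp only [List.any_eq_true, List.contains_iff_exists_mem_beq, beq_iff_eq]
  constructor
  · rintro ⟨p, hp, q, hq, rfl⟩; exact ⟨p, hq, p, hp, rfl⟩
  · rintro ⟨p, hp, q, hq, rfl⟩; exact ⟨p, hq, p, hp, rfl⟩

theorem pvW (ports : List Int) :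
    ([(135:Int), 139, 445, 3389].any (fun p => ports.contains p))
      = ports.any (fun p => [(135:Int), 139, 445, 3389].contains p) :=
  pvAnySwap _ ports

theorem pvL (ports : List Int) :
    ([(22:Int)].any (fun p => ports.contains p)) = ports.any (fun p => p == 22) := by
  rw [pvAnySwap, Bool.eq_iff_iff]
  simp only [List.any_eq_true, List.contains_iff_exists_mem_beq, beq_iff_eq,
    List.mem_singleton]
  exact ⟨fun ⟨p, hp, b, hb, he⟩ => ⟨p, hp, he.trans hb⟩,
         fun ⟨p, hp, he⟩ => ⟨p, hp, 22, rfl, he⟩⟩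

-- ===== VERDICT (by name: the statement is the Claim_ definition above) =====
theorem has_unusual_services_py_spec : Claim_equal_has_unusual_services_py := by
  intro ports _
  unfold Spec_has_unusual_services_py has_unusual_services_py has_unusual_services_py_alt
  rw [pvFold_char]
  simp only [PySem.Set.len, pvUpdateEmpty, pvLen_eq, pvSumOnes, pvW, pvL, Bool.false_or]
  split_ifs with h1 h2 <;> simp_all
  intro x hx hw y hy hy22
  exact h1 x hx hw (by rwa [hy22] at hy)
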